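-- pv_equiv track=rewrite | github.com/DGfinder/Safeshipper-python | backend/epg/erg_content_extraction_service.py | _determine_primary_hazard
-- ===== SOURCE A (Python) =====
-- def _determine_primary_hazard(hazard_classes: set) -> str:
--     """Determine primary hazard type from hazard classes"""
--
--     # Priority order for determining primary hazard
--     hazard_priority = {
--         '1': 'EXPLOSIVE',
--         '2.1': 'FLAMMABLE_GAS',
--         '2.2': 'NON_FLAMMABLE_GAS',
--         '2.3': 'TOXIC_GAS',
--         '3': 'FLAMMABLE_LIQUID',
--         '4.1': 'FLAMMABLE_SOLID',
--         '4.2': 'SPONTANEOUS_COMBUSTION',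
--         '4.3': 'WATER_REACTIVE',
--         '5.1': 'OXIDIZER',
--         '5.2': 'ORGANIC_PEROXIDE',
--         '6.1': 'TOXIC',
--         '6.2': 'INFECTIOUS',
--         '7': 'RADIOACTIVE',
--         '8': 'CORROSIVE',
--         '9': 'MISCELLANEOUS'
--     }
--
--     for hazard_code, hazard_type in hazard_priority.items():
--         if any(hc.startswith(hazard_code) for hc in hazard_classes):
--             return hazard_type
--
--     return 'GENERAL'
-- ===== SOURCE B (Python) =====
-- # B: inverted nesting — one pass over hazard_classes tracking the minimum priority
-- # rank; the per-class rank is the index of the single table code the class starts with.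
-- _HAZARD_TABLE = [
--     ('1', 'EXPLOSIVE'),
--     ('2.1', 'FLAMMABLE_GAS'),
--     ('2.2', 'NON_FLAMMABLE_GAS'),
--     ('2.3', 'TOXIC_GAS'),
--     ('3', 'FLAMMABLE_LIQUID'),
--     ('4.1', 'FLAMMABLE_SOLID'),
--     ('4.2', 'SPONTANEOUS_COMBUSTION'),
--     ('4.3', 'WATER_REACTIVE'),
--     ('5.1', 'OXIDIZER'),
--     ('5.2', 'ORGANIC_PEROXIDE'),
--     ('6.1', 'TOXIC'),
--     ('6.2', 'INFECTIOUS'),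
--     ('7', 'RADIOACTIVE'),
--     ('8', 'CORROSIVE'),
--     ('9', 'MISCELLANEOUS'),
-- ]
--
--
-- def _rank(hc):
--     i = 0
--     for code, _ in _HAZARD_TABLE:
--         if hc.startswith(code):
--             return i
--         i += 1
--     return i
--
--
-- def _determine_primary_hazard(hazard_classes: set) -> str:
--     best = len(_HAZARD_TABLE)
--     for hc in hazard_classes:
--         i = _rank(hc)
--         if i < best:
--             best = i
--     if best < len(_HAZARD_TABLE):
--         return _HAZARD_TABLE[best][1]
--     return 'GENERAL'
-- ===== Notes on version B (the rewrite author's own statement) =====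
-- stated objective: alternative
-- what changed: Inverts the loop nesting: instead of scanning the priority table and asking whether any class matches each code, B makes one pass over the classes, computes each class's priority rank from the table, keeps the minimum rank, and maps it back to a type at the end.
import Mathlib
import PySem

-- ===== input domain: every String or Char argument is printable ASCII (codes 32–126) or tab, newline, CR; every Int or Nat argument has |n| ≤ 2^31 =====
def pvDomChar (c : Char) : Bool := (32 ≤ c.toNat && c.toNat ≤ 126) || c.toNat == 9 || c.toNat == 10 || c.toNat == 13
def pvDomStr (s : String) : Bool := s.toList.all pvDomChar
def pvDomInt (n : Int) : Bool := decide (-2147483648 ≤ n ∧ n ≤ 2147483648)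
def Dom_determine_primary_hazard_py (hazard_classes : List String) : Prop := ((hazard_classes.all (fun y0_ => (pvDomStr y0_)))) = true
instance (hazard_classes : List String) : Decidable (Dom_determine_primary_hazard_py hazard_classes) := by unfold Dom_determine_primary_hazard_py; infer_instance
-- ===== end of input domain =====

-- B inverts the nesting: one pass over the classes keeping the minimum table rank,
-- instead of A's scan of the priority table asking whether any class matches each code.

-- the priority table (A's dict in insertion order = B's list of pairs)
def pvHazardTable : List (String × String) :=
  [("1", "EXPLOSIVE"), ("2.1", "FLAMMABLE_GAS"), ("2.2", "NON_FLAMMABLE_GAS"),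
   ("2.3", "TOXIC_GAS"), ("3", "FLAMMABLE_LIQUID"), ("4.1", "FLAMMABLE_SOLID"),
   ("4.2", "SPONTANEOUS_COMBUSTION"), ("4.3", "WATER_REACTIVE"), ("5.1", "OXIDIZER"),
   ("5.2", "ORGANIC_PEROXIDE"), ("6.1", "TOXIC"), ("6.2", "INFECTIOUS"),
   ("7", "RADIOACTIVE"), ("8", "CORROSIVE"), ("9", "MISCELLANEOUS")]

-- ===== PORT A =====
-- A's loop over the dict's items, returning at the first code some class starts with
def pvScanA : List (String × String) → List String → String
  | [], _ => "GENERAL"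
  | (code, ty) :: rest, hcs =>
      if hcs.any (fun hc => PySem.Str.startswith hc code) then ty else pvScanA rest hcs

def determine_primary_hazard_py (hazard_classes : List String) : String :=
  pvScanA pvHazardTable hazard_classes

-- ===== PORT B =====
-- Source B's _rank: index of the first table code hc starts with, table length if none
def pvRank : List (String × String) → String → Nat
  | [], _ => 0
  | (code, _) :: rest, hc =>
      if PySem.Str.startswith hc code then 0 else pvRank rest hc + 1

def determine_primary_hazard_py_alt (hazard_classes : List String) : String :=
  let best := hazard_classes.foldl
    (fun b hc => if pvRank pvHazardTable hc < b then pvRank pvHazardTable hc else b)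
    pvHazardTable.length
  if best < pvHazardTable.length then (pvHazardTable.getD best ("", "GENERAL")).2
  else "GENERAL"

-- ===== PRECONDITION & SPEC =====
def Spec_determine_primary_hazard_py (hazard_classes : List String) (out : String) : Prop := out = determine_primary_hazard_py_alt hazard_classes
instance (hazard_classes : List String) (out : String) : Decidable (Spec_determine_primary_hazard_py hazard_classes out) := by unfold Spec_determine_primary_hazard_py; infer_instance

-- ===== CLAIM (what is proved, stated in full; the proofs are below) =====
def Claim_equal_determine_primary_hazard_py : Prop := ∀ (hazard_classes : List String), Dom_determine_primary_hazard_py hazard_classes → Spec_determine_primary_hazard_py hazard_classes (determine_primary_hazard_py hazard_classes)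

-- ===== LEMMAS AND PROOFS =====

-- index of the first table code some class of hcs starts with; table length if none
def pvFm : List (String × String) → List String → Nat
  | [], _ => 0
  | (code, _) :: rest, hcs =>
      if hcs.any (fun hc => PySem.Str.startswith hc code) then 0 else pvFm rest hcs + 1

theorem pvFm_le (tbl : List (String × String)) (hcs : List String) :
    pvFm tbl hcs ≤ tbl.length := by
  induction tbl with
  | nil => simp [pvFm]
  | cons p rest ih =>
      obtain ⟨code, ty⟩ := p
      simp only [pvFm, List.length_cons]
      split <;> omega

theorem pvFm_nil (tbl : List (String × String)) : pvFm tbl [] = tbl.length := by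
  induction tbl with
  | nil => rfl
  | cons p rest ih =>
      obtain ⟨code, ty⟩ := p
      simp [pvFm, ih]

theorem pvFm_singleton (tbl : List (String × String)) (hc : String) :
    pvFm tbl [hc] = pvRank tbl hc := by
  induction tbl with
  | nil => rfl
  | cons p rest ih =>
      obtain ⟨code, ty⟩ := p
      simp [pvFm, pvRank, ih]

theorem pvFm_cons (tbl : List (String × String)) (hc : String) (hcs : List String) :
    pvFm tbl (hc :: hcs) = min (pvRank tbl hc) (pvFm tbl hcs) := by
  induction tbl with
  | nil => rfl
  | cons p rest ih =>
      obtain ⟨code, ty⟩ := p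
      simp only [pvFm, pvRank, List.any_cons, ih]
      cases h1 : PySem.Str.startswith hc code <;>
        cases h2 : hcs.any (fun x => PySem.Str.startswith x code) <;>
          (simp only [Bool.or_false, Bool.or_true, Bool.false_eq_true, if_false,
             if_true]; omega)

theorem pvFoldl_min (tbl : List (String × String)) (hcs : List String) :
    ∀ acc : Nat, acc ≤ tbl.length →
      hcs.foldl (fun b hc => if pvRank tbl hc < b then pvRank tbl hc else b) acc
        = min acc (pvFm tbl hcs) := by
  induction hcs with
  | nil =>
      intro acc hacc
      simp only [List.foldl_nil, pvFm_nil]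
      omega
  | cons hc rest ih =>
      intro acc hacc
      simp only [List.foldl_cons]
      have hr : pvRank tbl hc ≤ tbl.length := by
        rw [← pvFm_singleton]; exact pvFm_le tbl [hc]
      rw [ih _ (by split <;> omega), pvFm_cons]
      split <;> omega

theorem pvScanA_eq (tbl : List (String × String)) (hcs : List String) :
    pvScanA tbl hcs =
      if pvFm tbl hcs < tbl.length then (tbl.getD (pvFm tbl hcs) ("", "GENERAL")).2
      else "GENERAL" := by
  induction tbl with
  | nil => simp [pvScanA, pvFm]
  | cons p rest ih =>
      obtain ⟨code, ty⟩ := p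
      cases h : hcs.any (fun hc => PySem.Str.startswith hc code) with
      | true =>
          simp only [pvScanA, pvFm, h, if_true, List.length_cons]
          simp
      | false =>
          simp only [pvScanA, pvFm, h, Bool.false_eq_true, if_false, List.length_cons, ih]
          by_cases hlt : pvFm rest hcs < rest.length
          · simp [hlt]
          · simp [hlt]

-- ===== VERDICT (by name: the statement is the Claim_ definition above) =====
theorem determine_primary_hazard_py_spec : Claim_equal_determine_primary_hazard_py := by
  intro hcs _
  show determine_primary_hazard_py hcs = determine_primary_hazard_py_alt hcs
  unfold determine_primary_hazard_py determine_primary_hazard_py_alt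
  rw [pvScanA_eq, pvFoldl_min pvHazardTable hcs pvHazardTable.length (le_refl _)]
  have := pvFm_le pvHazardTable hcs
  rw [Nat.min_eq_right this]
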